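-- pv_equiv track=rewrite | github.com/huikinglam02gmail/Leetcode_solutions | 3803.count-residue-prefixes.py | residuePrefixes
-- ===== SOURCE A (Python) =====
-- def residuePrefixes(s: str) -> int:
--     seen = {}
--     result = 0
--     for i, c in enumerate(s):
--         seen[c] = seen.get(c, 0) + 1
--         if len(seen) == (i + 1) % 3:
--             result += 1
--     return result
-- ===== SOURCE B (Python) =====
-- def residuePrefixes(s: str) -> int:
--     # distinct count is non-decreasing; (i+1)%3 is in {0,1,2}, so a prefix can
--     # only match while exactly 1 or exactly 2 distinct chars have appeared.
--     n = len(s)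
--     if n == 0:
--         return 0
--     c0 = s[0]
--     j = 1
--     while j < n and s[j] == c0:
--         j += 1
--     if j < n:
--         c1 = s[j]
--         k = j + 1
--         while k < n and (s[k] == c0 or s[k] == c1):
--             k += 1
--     else:
--         k = j
--     # count of m in [1..x] with m % 3 == r (r in {1,2}), closed form
--     def f(x, r):
--         return (x - r) // 3 + 1
--     # prefixes of length 1..j have 1 distinct char; lengths j+1..k have 2
--     return f(j, 1) + (f(k, 2) - f(j, 2))
-- ===== Notes on version B (the rewrite author's own statement) =====
-- stated objective: faster
-- what changed: A maintains a character-count dict and tests len(dict) == (i+1)%3 at every position; B observes the distinct count is non-decreasing so matches can only occur while 1 or 2 distinct chars have appeared, finds the two phase boundaries by run-length scans (stopping at the third distinct character) and counts the matching residues in each phase with a closed-form formula, with no dict at all.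
import Mathlib
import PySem

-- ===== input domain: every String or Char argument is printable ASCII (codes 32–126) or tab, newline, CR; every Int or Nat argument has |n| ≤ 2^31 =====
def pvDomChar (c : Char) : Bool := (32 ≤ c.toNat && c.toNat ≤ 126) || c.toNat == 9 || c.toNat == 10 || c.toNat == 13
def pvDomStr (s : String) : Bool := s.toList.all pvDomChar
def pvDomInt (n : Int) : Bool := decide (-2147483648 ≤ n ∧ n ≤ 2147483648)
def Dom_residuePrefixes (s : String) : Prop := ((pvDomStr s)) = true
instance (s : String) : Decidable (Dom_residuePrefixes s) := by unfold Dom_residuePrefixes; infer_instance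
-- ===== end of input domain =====

-- B replaces A's per-character dict bookkeeping by two run-length scans (end of the
-- 1-distinct and 2-distinct phases) plus closed-form residue counting (objective: alternative).

-- ===== PORT A =====
def aStep (st : PySem.Dict Char Int × Int) (p : Int × Char) : PySem.Dict Char Int × Int :=
  let seen := st.1.insert p.2 (st.1.getD p.2 0 + 1)
  (seen, if (PySem.Dict.size seen : Int) = PySem.Int.mod (p.1 + 1) 3 then st.2 + 1 else st.2)

def residuePrefixes (s : String) : Int :=
  ((PySem.List.enumerate s.toList).foldl aStep (PySem.Dict.empty, 0)).2

-- ===== PORT B =====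
-- while j < n and s[j] == c0: j += 1   (length of the run, scanning from index 1)
def bRun1 (c0 : Char) : List Char → Nat
  | [] => 0
  | x :: xs => if x = c0 then bRun1 c0 xs + 1 else 0

-- while k < n and (s[k] == c0 or s[k] == c1): k += 1
def bRun2 (c0 c1 : Char) : List Char → Nat
  | [] => 0
  | x :: xs => if x = c0 ∨ x = c1 then bRun2 c0 c1 xs + 1 else 0

-- def f(x, r): return (x - r) // 3 + 1
def bF (x r : Int) : Int := PySem.Int.floordiv (x - r) 3 + 1

def residuePrefixes_alt (s : String) : Int :=
  match s.toList with
  | [] => 0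
  | c0 :: rest =>
    let j : Nat := 1 + bRun1 c0 rest
    match rest.drop (bRun1 c0 rest) with
    | [] =>
      let k := j
      bF (j : Int) 1 + (bF (k : Int) 2 - bF (j : Int) 2)
    | c1 :: rest2 =>
      let k : Nat := j + 1 + bRun2 c0 c1 rest2
      bF (j : Int) 1 + (bF (k : Int) 2 - bF (j : Int) 2)

-- ===== PRECONDITION & SPEC =====
def Spec_residuePrefixes (s : String) (out : Int) : Prop := out = residuePrefixes_alt s
instance (s : String) (out : Int) : Decidable (Spec_residuePrefixes s out) := by unfold Spec_residuePrefixes; infer_instance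

-- ===== CLAIM (what is proved, stated in full; the proofs are below) =====
def Claim_equal_residuePrefixes : Prop := ∀ (s : String), Dom_residuePrefixes s → Spec_residuePrefixes s (residuePrefixes s)

-- ===== LEMMAS AND PROOFS =====

-- match count of A's loop, as a recursion over the remaining characters with the consumed prefix p
def cnt (p l : List Char) : Int :=
  match l with
  | [] => 0
  | x :: xs =>
    (if (PySem.Set.add (PySem.Set.ofList p) x).length = (p.length + 1) % 3 then 1 else 0)
      + cnt (p ++ [x]) xs

lemma dict_size_eq_keys_length (d : PySem.Dict Char Int) : PySem.Dict.size d = d.keys.length := by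
  simp [PySem.Dict.size, PySem.Dict.keys]

lemma A_gen (l : List Char) : ∀ (p : List Char) (d : PySem.Dict Char Int) (r : Int),
    d.keys = PySem.Set.ofList p →
    ((PySem.List.enumerate l (p.length : Int)).foldl aStep (d, r)).2 = r + cnt p l := by
  induction l with
  | nil => intro p d r _; simp [cnt, PySem.List.enumerate_nil]
  | cons x xs ih =>
    intro p d r hkeys
    have hkeys' : (d.insert x (d.getD x 0 + 1)).keys = PySem.Set.ofList (p ++ [x]) := by
      rw [PySem.Set.ofList_append_singleton]
      by_cases hc : d.contains x = true
      · rw [PySem.Dict.keys_insert_of_contains d _ hc, hkeys,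
          PySem.Set.add_of_mem (hkeys ▸ (PySem.Dict.contains_iff_mem_keys d x).mp hc)]
      · have hc' : d.contains x = false := by simpa using hc
        have hmem : x ∉ PySem.Set.ofList p := by
          intro hm
          rw [(PySem.Dict.contains_iff_mem_keys d x).mpr (hkeys ▸ hm)] at hc'
          exact absurd hc' (by simp)
        rw [PySem.Dict.keys_insert_of_not_contains d _ hc', hkeys, PySem.Set.add_of_not_mem hmem]
    have hsize : PySem.Dict.size (d.insert x (d.getD x 0 + 1))
        = (PySem.Set.add (PySem.Set.ofList p) x).length := by
      rw [dict_size_eq_keys_length, hkeys', PySem.Set.ofList_append_singleton]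
    have hmod : PySem.Int.mod ((p.length : Int) + 1) 3 = (((p.length + 1) % 3 : Nat) : Int) := by
      have h := PySem.Int.mod_natCast (p.length + 1) 3
      push_cast at h ⊢
      exact_mod_cast h
    have hlen : ((p ++ [x]).length : Int) = (p.length : Int) + 1 := by
      simp
    rw [PySem.List.enumerate_cons, List.foldl_cons]
    show ((PySem.List.enumerate xs ((p.length : Int) + 1)).foldl aStep (aStep (d, r) ((p.length : Int), x))).2 = r + cnt p (x :: xs)
    rw [← hlen]
    simp only [aStep, hsize, hmod]
    rw [ih (p ++ [x]) _ _ hkeys']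
    simp only [cnt, Nat.cast_inj]
    split_ifs <;> ring

lemma add_length_ge {s : List Char} {x : Char} : s.length ≤ (PySem.Set.add s x).length := by
  rw [PySem.Set.add_eq_ite]
  split_ifs <;> simp

lemma phase3 (l : List Char) : ∀ (p : List Char), 3 ≤ (PySem.Set.ofList p).length →
    cnt p l = 0 := by
  induction l with
  | nil => intro p _; rfl
  | cons x xs ih =>
    intro p h
    have h1 : 3 ≤ (PySem.Set.add (PySem.Set.ofList p) x).length := le_trans h add_length_ge
    have h2 : (p.length + 1) % 3 < 3 := Nat.mod_lt _ (by norm_num)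
    simp only [cnt, if_neg (by omega : ¬ ((PySem.Set.add (PySem.Set.ofList p) x).length = (p.length + 1) % 3)), zero_add]
    exact ih (p ++ [x]) (by rw [PySem.Set.ofList_append_singleton]; exact h1)

lemma phase2 (l : List Char) : ∀ (p : List Char) (c0 c1 : Char),
    PySem.Set.ofList p = [c0, c1] →
    cnt p l = bF ((p.length + bRun2 c0 c1 l : Nat) : Int) 2 - bF (p.length : Int) 2 := by
  induction l with
  | nil => intro p c0 c1 _; simp [cnt, bRun2]
  | cons x xs ih =>
    intro p c0 c1 h
    by_cases hx : x = c0 ∨ x = c1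
    · have hmem : x ∈ PySem.Set.ofList p := by
        rw [h]; rcases hx with h' | h' <;> simp [h']
      have hadd : PySem.Set.add (PySem.Set.ofList p) x = PySem.Set.ofList p :=
        PySem.Set.add_of_mem hmem
      have ihx := ih (p ++ [x]) c0 c1 (by rw [PySem.Set.ofList_append_singleton, hadd, h])
      have hlen : (PySem.Set.add (PySem.Set.ofList p) x).length = 2 := by rw [hadd, h]; rfl
      simp only [cnt, hlen, ihx, bRun2, if_pos hx, List.length_append, List.length_cons,
        List.length_nil]
      have hm3 : (p.length + 1) % 3 < 3 := Nat.mod_lt _ (by norm_num)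
      simp only [bF, PySem.Int.floordiv_eq_ediv_of_pos (by norm_num : (0:Int) < 3)]
      split_ifs with h1 <;> push_cast <;> omega
    · push Not at hx
      have hmem : x ∉ PySem.Set.ofList p := by rw [h]; simp [hx.1, hx.2]
      have hadd : PySem.Set.add (PySem.Set.ofList p) x = PySem.Set.ofList p ++ [x] :=
        PySem.Set.add_of_not_mem hmem
      have h3 : cnt (p ++ [x]) xs = 0 :=
        phase3 xs (p ++ [x]) (by rw [PySem.Set.ofList_append_singleton, hadd, h]; simp)
      have hm3 : (p.length + 1) % 3 < 3 := Nat.mod_lt _ (by norm_num)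
      have hcond : ¬ ((PySem.Set.add (PySem.Set.ofList p) x).length = (p.length + 1) % 3) := by
        rw [hadd, h]; simp; omega
      simp only [cnt, if_neg hcond, h3, bRun2, if_neg (by tauto : ¬ (x = c0 ∨ x = c1))]
      simp

-- contribution of the 2-distinct phase, as a function of the first phase's end
def phase2part (c0 : Char) (m : Nat) (t : List Char) : Int :=
  match t with
  | [] => 0
  | c1 :: rest2 => bF ((m + 1 + bRun2 c0 c1 rest2 : Nat) : Int) 2 - bF ((m : Nat) : Int) 2

lemma phase1 (l : List Char) : ∀ (p : List Char) (c0 : Char),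
    PySem.Set.ofList p = [c0] →
    cnt p l = (bF ((p.length + bRun1 c0 l : Nat) : Int) 1 - bF (p.length : Int) 1)
      + phase2part c0 (p.length + bRun1 c0 l) (l.drop (bRun1 c0 l)) := by
  induction l with
  | nil => intro p c0 _; simp [cnt, bRun1, phase2part]
  | cons x xs ih =>
    intro p c0 h
    by_cases hx : x = c0
    · subst hx
      have hmem : x ∈ PySem.Set.ofList p := by rw [h]; simp
      have hadd : PySem.Set.add (PySem.Set.ofList p) x = PySem.Set.ofList p :=
        PySem.Set.add_of_mem hmem
      have ihx := ih (p ++ [x]) x (by rw [PySem.Set.ofList_append_singleton, hadd, h])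
      have hlen : (PySem.Set.add (PySem.Set.ofList p) x).length = 1 := by rw [hadd, h]; rfl
      simp only [cnt, hlen, ihx, bRun1, if_true, List.length_append,
        List.length_cons, List.length_nil, List.drop_succ_cons]
      have harg : p.length + 1 + bRun1 x xs = p.length + (bRun1 x xs + 1) := by omega
      rw [harg]
      simp only [bF, PySem.Int.floordiv_eq_ediv_of_pos (by norm_num : (0:Int) < 3)]
      split_ifs with h1 <;> push_cast <;> omega
    · have hmem : x ∉ PySem.Set.ofList p := by rw [h]; simp [hx]
      have hadd : PySem.Set.add (PySem.Set.ofList p) x = PySem.Set.ofList p ++ [x] :=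
        PySem.Set.add_of_not_mem hmem
      have h2 := phase2 xs (p ++ [x]) c0 x (by rw [PySem.Set.ofList_append_singleton, hadd, h]; rfl)
      have hlen : (PySem.Set.add (PySem.Set.ofList p) x).length = 2 := by rw [hadd, h]; rfl
      simp only [cnt, hlen, h2, bRun1, if_neg hx, List.length_append, List.length_cons,
        List.length_nil, List.drop_zero, Nat.add_zero, phase2part]
      simp only [bF, PySem.Int.floordiv_eq_ediv_of_pos (by norm_num : (0:Int) < 3)]
      split_ifs with h1 <;> push_cast <;> omega

-- ===== VERDICT (by name: the statement is the Claim_ definition above) =====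
theorem residuePrefixes_spec : Claim_equal_residuePrefixes := by
  unfold Claim_equal_residuePrefixes
  intro s _
  unfold Spec_residuePrefixes residuePrefixes residuePrefixes_alt
  have hA : ∀ (l : List Char),
      ((PySem.List.enumerate l).foldl aStep (PySem.Dict.empty, 0)).2 = cnt [] l := by
    intro l
    have := A_gen l [] PySem.Dict.empty 0 (by simp [PySem.Dict.keys_empty, PySem.Set.ofList])
    simpa using this
  rw [hA]
  cases hl : s.toList with
  | nil => simp [cnt]
  | cons c0 rest =>
    have hof : PySem.Set.ofList [c0] = [c0] := by
      apply PySem.Set.ofList_eq_self_of_nodup; simp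
    have hfirst : cnt [] (c0 :: rest) = 1 + cnt [c0] rest := by
      simp [cnt]
    have h1 := phase1 rest [c0] c0 hof
    show cnt [] (c0 :: rest) =
      (match rest.drop (bRun1 c0 rest) with
       | [] =>
         bF ((1 + bRun1 c0 rest : Nat) : Int) 1
           + (bF ((1 + bRun1 c0 rest : Nat) : Int) 2 - bF ((1 + bRun1 c0 rest : Nat) : Int) 2)
       | c1 :: rest2 =>
         bF ((1 + bRun1 c0 rest : Nat) : Int) 1
           + (bF ((1 + bRun1 c0 rest + 1 + bRun2 c0 c1 rest2 : Nat) : Int) 2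
               - bF ((1 + bRun1 c0 rest : Nat) : Int) 2))
    simp only [List.length_cons, List.length_nil, Nat.zero_add] at h1
    rw [hfirst, h1]
    cases hdrop : rest.drop (bRun1 c0 rest) with
    | nil =>
      simp [phase2part]
      rw [show bF (1 : Int) 1 = 1 from by decide]
      ring
    | cons c1 rest2 =>
      simp [phase2part]
      rw [show bF (1 : Int) 1 = 1 from by decide]
      ring
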